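-- pv_equiv track=rewrite | github.com/anavaicum/PyCharm- | lab 1 pr 3 b).py | longest_prim
-- ===== SOURCE A (Python) =====
-- def isprime(num):
--     if num <= 1:
--         return False
--     for i in range(2, int(num**0.5) + 1):
--         if num % i == 0:
--             return False
--     return True
--
-- def longest_prim(vector):
--     max_l = 0  # definim 4 contoare
--     max_start_ind = -1
--     current_l = 0
--     current_ind = -1
--
--     for i in range(
--             len(vector)):  # Aceast for parcurge vectorul și verifica pentru fiecare element dacă este prim folosind funcția isprime
--         if isprime(vector[i]):
--             current_l += 1  # daca elementul este prim, contorul nostru curent creste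
--             if current_ind == -1:  # daca indexul contorului este -1 atunci indexul devine pozitia curenta a elementului prim gasit adica i
--                 current_ind = i
--         else:  # in cazul in care elementul gasit nu este numar prim verificam daca contorul curent este mai mare decat contorul maxim
--             if current_l > max_l:
--                 max_l = current_l  # in caz afirmativ, contorul maxim ia valoarea contorului curent
--                 max_start_ind = current_ind  # si indexul maxim ia valoarea indexului curent i
--             current_l = 0  # la final resetam contoarele curente si bucla se repeta
--             current_ind = -1
--
--     if current_l > max_l:
--         max_l = current_l
--         max_start_ind = current_ind
--
--     if max_start_ind >= 0:  # verificam daca secventa maxima este mai mare decat 0 , in caz afirmativ returnam secventa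
--         return vector[max_start_ind:max_start_ind + max_l]
--     else:
--         return None  # in caz negativ returnam None
-- ===== SOURCE B (Python) =====
-- def isprime(num):
--     if num <= 1:
--         return False
--     for i in range(2, int(num**0.5) + 1):
--         if num % i == 0:
--             return False
--     return True
--
-- def longest_prim(vector):
--     # Segment first: collect every maximal run of primes as (start, length),
--     # then pick the longest (earliest on ties) and slice it out.
--     n = len(vector)
--     runs = []
--     i = 0
--     while i < n:
--         if isprime(vector[i]):
--             j = i + 1
--             while j < n and isprime(vector[j]):
--                 j += 1
--             runs.append((i, j - i))
--             i = j
--         else: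
--             i += 1
--     if not runs:
--         return None
--     best = runs[0]
--     for r in runs[1:]:
--         if r[1] > best[1]:
--             best = r
--     return vector[best[0]:best[0] + best[1]]
-- ===== Notes on version B (the rewrite author's own statement) =====
-- stated objective: alternative
-- what changed: Replaces the four-counter single-pass scan (with its duplicated post-loop commit) by a two-phase algorithm: segment the vector into maximal prime runs (start, length) first, then select the earliest longest run and slice it.
import Mathlib
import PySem

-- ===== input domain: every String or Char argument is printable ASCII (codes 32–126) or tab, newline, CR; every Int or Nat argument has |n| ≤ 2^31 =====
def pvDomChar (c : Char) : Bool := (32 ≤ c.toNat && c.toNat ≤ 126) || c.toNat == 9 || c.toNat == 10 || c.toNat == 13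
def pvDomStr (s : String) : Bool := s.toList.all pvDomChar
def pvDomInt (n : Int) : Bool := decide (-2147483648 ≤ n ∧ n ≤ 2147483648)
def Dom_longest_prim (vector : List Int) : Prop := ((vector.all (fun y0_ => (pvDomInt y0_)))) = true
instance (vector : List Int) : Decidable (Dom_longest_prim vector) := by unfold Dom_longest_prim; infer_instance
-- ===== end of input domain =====

-- B segments the vector into maximal prime runs first and then selects the earliest
-- longest run, replacing A's four-counter single pass; objective: alternative decomposition.

-- ===== PORT A =====
-- shared helper: both Pythons define the identical isprime.
-- 'int(num**0.5)' is ported as Nat.sqrt, exact for the domain |num| ≤ 2^31;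
-- the for-loop with early 'return False' is ported as List.all over the same range.
def isprimeB (num : Int) : Bool :=
  if num ≤ 1 then false
  else (PySem.List.pyRange 2 ((Nat.sqrt num.toNat + 1 : Nat) : Int) 1).all
        (fun i => !(PySem.Int.mod num i == 0))

-- one iteration of A's for-loop; state = (max_l, max_start_ind, current_l, current_ind)
def stepA (vector : List Int) (st : Int × Int × Int × Int) (i : Int) : Int × Int × Int × Int :=
  if isprimeB (PySem.List.pyGetD vector i 0) then
    (st.1, st.2.1, st.2.2.1 + 1, if st.2.2.2 = -1 then i else st.2.2.2)
  else
    if st.2.2.1 > st.1 then (st.2.2.1, st.2.2.2, 0, -1) else (st.1, st.2.1, 0, -1)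

def longest_prim (vector : List Int) : Option (List Int) :=
  let s := (PySem.List.pyRange 0 (vector.length : Int) 1).foldl (stepA vector) (0, -1, 0, -1)
  let fin : Int × Int := if s.2.2.1 > s.1 then (s.2.2.1, s.2.2.2) else (s.1, s.2.1)
  if fin.2 ≥ 0 then some (PySem.List.slice vector (some fin.2) (some (fin.2 + fin.1))) else none

-- ===== PORT B =====
-- inner while loop: advance j while j < n and isprime(vector[j])
def runScan (v : List Int) (j : Nat) : Nat :=
  if h : j < v.length then
    if isprimeB v[j] then runScan v (j + 1) else j
  else j
termination_by v.length - j

-- needed for runsAux's termination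
theorem runScan_ge (v : List Int) (j : Nat) : j ≤ runScan v j := by
  unfold runScan
  split
  · split
    · have := runScan_ge v (j + 1); omega
    · omega
  · omega
termination_by v.length - j

-- outer while loop collecting the maximal prime runs as (start, length)
def runsAux (v : List Int) (i : Nat) : List (Nat × Nat) :=
  if h : i < v.length then
    if isprimeB v[i] then
      let j := runScan v (i + 1)
      (i, j - i) :: runsAux v j
    else runsAux v (i + 1)
  else []
termination_by v.length - i
decreasing_by
  · have := runScan_ge v (i + 1); omega
  · omega

-- the 'best' selection loop: best = runs[0]; for r in runs[1:]: if r[1] > best[1]: best = r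
def bestRun (rs : List (Nat × Nat)) (b : Nat × Nat) : Nat × Nat :=
  rs.foldl (fun b r => if r.2 > b.2 then r else b) b

def longest_prim_alt (vector : List Int) : Option (List Int) :=
  match runsAux vector 0 with
  | [] => none
  | r :: rest =>
    let best := bestRun rest r
    some (PySem.List.slice vector (some (best.1 : Int)) (some ((best.1 : Int) + (best.2 : Int))))

-- ===== PRECONDITION & SPEC =====
def Spec_longest_prim (vector : List Int) (out : Option (List Int)) : Prop := out = longest_prim_alt vector
instance (vector : List Int) (out : Option (List Int)) : Decidable (Spec_longest_prim vector out) := by unfold Spec_longest_prim; infer_instance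

-- ===== CLAIM (what is proved, stated in full; the proofs are below) =====
def Claim_equal_longest_prim : Prop := ∀ (vector : List Int), Dom_longest_prim vector → Spec_longest_prim vector (longest_prim vector)

-- ===== LEMMAS AND PROOFS =====

-- A's after-the-loop commit, as a function of the loop state
def postSel (s : Int × Int × Int × Int) : Int × Int :=
  if s.2.2.1 > s.1 then (s.2.2.1, s.2.2.2) else (s.1, s.2.1)

-- selection over the runs list carried in A's (max_l, max_start_ind) representation
def selFold (rs : List (Nat × Nat)) (b : Int × Int) : Int × Int :=
  rs.foldl (fun b r => if (r.2 : Int) > b.1 then ((r.2 : Int), (r.1 : Int)) else b) b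

theorem runScan_le (v : List Int) (j : Nat) (h : j ≤ v.length) : runScan v j ≤ v.length := by
  unfold runScan
  split
  · split
    · exact runScan_le v (j + 1) (by omega)
    · omega
  · omega
termination_by v.length - j

theorem runScan_primes (v : List Int) (j : Nat) :
    ∀ k, j ≤ k → k < runScan v j → isprimeB (v.getD k 0) = true := by
  intro k hk1 hk2
  unfold runScan at hk2
  split at hk2
  · rename_i h
    split at hk2
    · rename_i hp
      rcases Nat.eq_or_lt_of_le hk1 with rfl | hlt
      · rwa [List.getD_eq_getElem v 0 h]
      · exact runScan_primes v (j + 1) k hlt hk2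
    · omega
  · omega
termination_by v.length - j

theorem runScan_stop (v : List Int) (j : Nat) (h : j ≤ v.length) :
    runScan v j = v.length ∨
      (runScan v j < v.length ∧ isprimeB (v.getD (runScan v j) 0) = false) := by
  unfold runScan
  split
  · rename_i hlt
    split
    · exact runScan_stop v (j + 1) (by omega)
    · rename_i hp
      right
      refine ⟨hlt, ?_⟩
      rw [List.getD_eq_getElem v 0 hlt]
      simpa using hp
  · left; omega
termination_by v.length - j

theorem runsAux_len_pos (v : List Int) (i : Nat) :
    ∀ r ∈ runsAux v i, 1 ≤ r.2 := by
  intro r hr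
  unfold runsAux at hr
  split at hr
  · rename_i h
    split at hr
    · rcases List.mem_cons.mp hr with rfl | hr'
      · have := runScan_ge v (i + 1); simp; omega
      · exact runsAux_len_pos v (runScan v (i + 1)) r hr'
    · exact runsAux_len_pos v (i + 1) r hr
  · simp at hr
termination_by v.length - i
decreasing_by
  · omega
  · have := runScan_ge v (i + 1); omega

-- processing a segment of indices that are all prime just extends current_l
theorem segmentA (v : List Int) (a b : Nat) (hb : b ≤ v.length) (hab : a ≤ b)
    (hp : ∀ k, a ≤ k → k < b → isprimeB (v.getD k 0) = true)
    (m ms c ci : Int) (hci : ci ≠ -1) :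
    (PySem.List.pyRange (a : Int) (v.length : Int) 1).foldl (stepA v) (m, ms, c, ci)
      = (PySem.List.pyRange (b : Int) (v.length : Int) 1).foldl (stepA v)
          (m, ms, c + ((b - a : Nat) : Int), ci) := by
  rcases Nat.eq_or_lt_of_le hab with rfl | hlt
  · simp
  · have ha : (a : Int) < (v.length : Int) := by exact_mod_cast lt_of_lt_of_le hlt hb
    rw [PySem.List.pyRange_one_cons ha, List.foldl_cons]
    have hstep : stepA v (m, ms, c, ci) (a : Int) = (m, ms, c + 1, ci) := by
      unfold stepA
      rw [PySem.List.pyGetD_natCast, hp a le_rfl hlt]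
      simp [hci]
    rw [hstep, show ((a : Int) + 1) = ((a + 1 : Nat) : Int) by push_cast; ring]
    rw [segmentA v (a + 1) b hb hlt (fun k hk1 hk2 => hp k (by omega) hk2) m ms (c + 1) ci hci]
    rw [show c + 1 + ((b - (a + 1) : Nat) : Int) = c + ((b - a : Nat) : Int) by omega]
termination_by b - a

-- the main loop invariant: from a run boundary, finishing A's loop and committing
-- equals folding the selection over the remaining runs
theorem mainA (v : List Int) (i : Nat) (hi : i ≤ v.length) (m ms : Int) (hm : 0 ≤ m) :
    postSel ((PySem.List.pyRange (i : Int) (v.length : Int) 1).foldl (stepA v) (m, ms, 0, -1))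
      = selFold (runsAux v i) (m, ms) := by
  rcases Nat.eq_or_lt_of_le hi with rfl | hlt
  · rw [PySem.List.pyRange_one_eq_nil le_rfl]
    have h0 : runsAux v v.length = [] := by rw [runsAux]; simp
    rw [h0]
    simp only [List.foldl_nil, selFold, postSel]
    rw [if_neg (by omega)]
  · have ha : (i : Int) < (v.length : Int) := by exact_mod_cast hlt
    rw [PySem.List.pyRange_one_cons ha, List.foldl_cons]
    by_cases hp : isprimeB v[i] = true
    · -- a prime run starts at i
      have hge : i + 1 ≤ runScan v (i + 1) := runScan_ge v (i + 1)
      have hle : runScan v (i + 1) ≤ v.length := runScan_le v (i + 1) (by omega)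
      set j := runScan v (i + 1) with hj
      have hstep : stepA v (m, ms, 0, -1) (i : Int) = (m, ms, 1, (i : Int)) := by
        unfold stepA
        rw [PySem.List.pyGetD_natCast, List.getD_eq_getElem v 0 hlt, hp]
        norm_num
      have hci : (i : Int) ≠ -1 := by omega
      rw [hstep, show ((i : Int) + 1) = ((i + 1 : Nat) : Int) by push_cast; ring]
      rw [segmentA v (i + 1) j hle hge (fun k hk1 hk2 => runScan_primes v (i + 1) k hk1 hk2) m ms 1 (i : Int) hci]
      rw [show (1 : Int) + ((j - (i + 1) : Nat) : Int) = ((j - i : Nat) : Int) by omega]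
      have hrw : runsAux v i = (i, j - i) :: runsAux v j := by
        rw [runsAux]; simp [hlt, hp, hj]
      rw [hrw]
      rcases runScan_stop v (i + 1) (by omega) with hstop | hstop
      · -- the run reaches the end of the vector
        rw [← hj] at hstop
        have h0 : runsAux v j = [] := by rw [runsAux]; simp [hstop]
        rw [h0, show (j : Int) = (v.length : Int) by exact_mod_cast hstop,
          PySem.List.pyRange_one_eq_nil le_rfl]
        simp only [List.foldl_nil, selFold, List.foldl_cons, postSel]
      · rw [← hj] at hstop
        obtain ⟨hjlt, hnp⟩ := hstop
        have hb : (j : Int) < (v.length : Int) := by exact_mod_cast hjlt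
        rw [PySem.List.pyRange_one_cons hb, List.foldl_cons]
        have hrw2 : runsAux v j = runsAux v (j + 1) := by
          rw [runsAux]
          have hx : isprimeB v[j] = false := by
            rw [← List.getD_eq_getElem v 0 hjlt]; exact hnp
          simp [hjlt, hx]
        rw [hrw2]
        have hstep2 : stepA v (m, ms, ((j - i : Nat) : Int), (i : Int)) (j : Int)
            = if ((j - i : Nat) : Int) > m then (((j - i : Nat) : Int), (i : Int), 0, -1)
              else (m, ms, 0, -1) := by
          unfold stepA
          rw [PySem.List.pyGetD_natCast, hnp]
          norm_num
        rw [hstep2, show ((j : Int) + 1) = ((j + 1 : Nat) : Int) by push_cast; ring]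
        simp only [selFold, List.foldl_cons]
        by_cases hgt : ((j - i : Nat) : Int) > m
        · rw [if_pos hgt, if_pos hgt]
          simpa only [selFold] using
            mainA v (j + 1) (by omega) ((j - i : Nat) : Int) (i : Int) (Int.natCast_nonneg _)
        · rw [if_neg hgt, if_neg hgt]
          simpa only [selFold] using mainA v (j + 1) (by omega) m ms hm
    · -- vector[i] is not prime: state unchanged
      have hstep : stepA v (m, ms, 0, -1) (i : Int) = (m, ms, 0, -1) := by
        unfold stepA
        rw [PySem.List.pyGetD_natCast, List.getD_eq_getElem v 0 hlt,
          (by simpa using hp : isprimeB v[i] = false)]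
        simp [show ¬((0 : Int) > m) by omega]
      rw [hstep, show ((i : Int) + 1) = ((i + 1 : Nat) : Int) by push_cast; ring]
      rw [mainA v (i + 1) (by omega) m ms hm]
      have hrw : runsAux v i = runsAux v (i + 1) := by
        rw [runsAux]; simp [hlt, hp]
      rw [hrw]
termination_by v.length - i
decreasing_by
  all_goals omega

theorem selFold_cast (rs : List (Nat × Nat)) (b : Nat × Nat) :
    selFold rs ((b.2 : Int), (b.1 : Int)) = (((bestRun rs b).2 : Int), ((bestRun rs b).1 : Int)) := by
  induction rs generalizing b with
  | nil => rfl
  | cons r t ih =>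
    simp only [selFold, bestRun, List.foldl_cons]
    by_cases h : b.2 < r.2
    · rw [if_pos (by exact_mod_cast h), if_pos (by simpa using h)]
      exact ih r
    · rw [if_neg (by exact_mod_cast h), if_neg (by simpa using h)]
      exact ih b

-- ===== VERDICT (by name: the statement is the Claim_ definition above) =====
theorem longest_prim_spec : Claim_equal_longest_prim := by
  intro v _
  simp only [Spec_longest_prim, longest_prim, longest_prim_alt]
  have hmain := mainA v 0 (by omega) 0 (-1) le_rfl
  simp only [Nat.cast_zero, postSel] at hmain
  rw [hmain]
  cases hrs : runsAux v 0 with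
  | nil => simp [selFold]
  | cons r rest =>
    have h1 : 1 ≤ r.2 := runsAux_len_pos v 0 r (by rw [hrs]; exact List.mem_cons_self ..)
    have hsel : selFold (r :: rest) (0, -1) = (((bestRun rest r).2 : Int), ((bestRun rest r).1 : Int)) := by
      simp only [selFold, List.foldl_cons]
      rw [if_pos (by exact_mod_cast h1 : (r.2 : Int) > (0 : Int))]
      exact selFold_cast rest r
    rw [hsel]
    simp
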